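-- pv_equiv track=rewrite | github.com/nick-esqueda/leetcode-practice | 0-STRUCTY/stack/nesting_score.py | nesting_score
-- ===== SOURCE A (Python) =====
-- def nesting_score(string):
--   sta = [0]
--   for brack in string:
--     if brack == "[":
--       sta.append(0)
--     elif brack == "]":
--       top = sta.pop()
--       if top == 0:
--         sta[-1] += 1
--       else:
--         sta[-1] += top * 2
--   return sta[0]
-- ===== SOURCE B (Python) =====
-- def nesting_score(string):
--     it = iter(string)
--
--     def parse():
--         score = 0
--         for c in it:
--             if c == '[':
--                 inner, closed = parse()
--                 if closed:
--                     score += 1 if inner == 0 else 2 * inner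
--             elif c == ']':
--                 return score, True
--         return score, False
--
--     return parse()[0]
-- ===== Notes on version B (the rewrite author's own statement) =====
-- stated objective: alternative
-- what changed: Replaces the explicit list-of-accumulators stack with a recursive-descent parser over a shared character iterator: each '[' recurses for the inner score and the call stack carries the nesting.
-- crash fix: On strings where some prefix contains more ']' than '[', A raises IndexError (sta[-1] on an empty list); B returns the score accumulated at the current level (e.g. 0 on ']'). — e.g. on nesting_score("]"): A raises IndexError, B returns 0
import Mathlib
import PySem

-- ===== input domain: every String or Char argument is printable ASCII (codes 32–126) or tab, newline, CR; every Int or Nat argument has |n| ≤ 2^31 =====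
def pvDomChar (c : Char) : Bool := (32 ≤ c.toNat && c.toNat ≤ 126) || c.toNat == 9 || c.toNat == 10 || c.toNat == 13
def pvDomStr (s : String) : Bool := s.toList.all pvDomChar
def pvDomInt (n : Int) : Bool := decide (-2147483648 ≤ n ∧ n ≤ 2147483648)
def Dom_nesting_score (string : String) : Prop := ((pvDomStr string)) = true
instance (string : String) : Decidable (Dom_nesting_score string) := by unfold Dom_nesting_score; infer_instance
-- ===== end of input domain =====

-- B replaces A's explicit stack of per-depth accumulators by a recursive-descent
-- parser over the character stream (alternative decomposition, same cost).


-- ===== PORT A =====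
-- One iteration of A's loop.  The Python list `sta` is kept in the same order
-- (append/pop at the END, `sta[-1]` = last element); `none` models the
-- IndexError Python raises when `sta[-1]` is read on the emptied list.
def nesting_score_step (o : Option (List Int)) (brack : Char) : Option (List Int) :=
  match o with
  | none => none
  | some sta =>
    if brack = '[' then some (sta ++ [0])
    else if brack = ']' then
      match sta.getLast? with
      | none => none                    -- sta.pop() on empty (unreachable from [0])
      | some top =>
        let sta' := sta.dropLast
        match sta'.getLast? with
        | none => none                  -- sta[-1] IndexError
        | some last => some (sta'.dropLast ++ [last + (if top = 0 then 1 else top * 2)])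
    else some sta

def nesting_score (string : String) : Int :=
  match string.toList.foldl nesting_score_step (some [0]) with
  | some sta => sta.headD 0             -- sta[0]
  | none => 0                           -- Python raised here; excluded by Pre_

-- ===== PORT B =====
-- B's closed-group contribution: 1 if inner == 0 else 2 * inner
def nesting_score_f (inner : Int) : Int := if inner = 0 then 1 else 2 * inner

-- parse(): the shared iterator becomes the remaining character list; the result
-- is (score, rest of the stream, closed?).  `fuel` only makes the nested
-- recursion structurally terminating; length+1 is always enough (see lemmas).
def nesting_score_parse : Nat → List Char → Int → Int × List Char × Bool
  | 0, cs, score => (score, cs, false)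
  | _ + 1, [], score => (score, [], false)
  | fuel + 1, c :: cs, score =>
    if c = '[' then
      match nesting_score_parse fuel cs 0 with
      | (inner, cs', true) => nesting_score_parse fuel cs' (score + nesting_score_f inner)
      | (_, cs', false) => (score, cs', false)
    else if c = ']' then (score, cs, true)
    else nesting_score_parse fuel cs score

def nesting_score_alt (string : String) : Int :=
  (nesting_score_parse (string.toList.length + 1) string.toList 0).1

-- ===== PRECONDITION & SPEC =====
-- Pre_ excludes exactly the strings on which A raises IndexError: those with a
-- prefix containing more ']' than '['.
def Pre_nesting_score (string : String) : Prop :=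
  ∀ n ≤ string.toList.length,
    (string.toList.take n).count ']' ≤ (string.toList.take n).count '['
instance (string : String) : Decidable (Pre_nesting_score string) := by
  unfold Pre_nesting_score; infer_instance

def pvWitness_nesting_score : String := "[[]a[]]"

-- On strings where some prefix contains more ']' than '[', A raises IndexError; B returns the score accumulated at the current level.
def Raises_nesting_score (string : String) : Prop :=
  ∃ n ≤ string.toList.length,
    (string.toList.take n).count '[' < (string.toList.take n).count ']'
instance (string : String) : Decidable (Raises_nesting_score string) := by
  unfold Raises_nesting_score; infer_instance

def pvRaiseWitness_nesting_score : String := "]"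
def pvRaiseWitnessOut_nesting_score : Int := 0

def Spec_nesting_score (string : String) (out : Int) : Prop := out = nesting_score_alt string
instance (string : String) (out : Int) : Decidable (Spec_nesting_score string out) := by unfold Spec_nesting_score; infer_instance

-- ===== CLAIM (what is proved, stated in full; the proofs are below) =====
def Claim_equal_nesting_score : Prop := ∀ (string : String), Dom_nesting_score string → Pre_nesting_score string → Spec_nesting_score string (nesting_score string)
def Claim_raises_nesting_score : Prop := (∀ (string : String), Dom_nesting_score string → Raises_nesting_score string → ¬ Pre_nesting_score string) ∧ (Dom_nesting_score (pvRaiseWitness_nesting_score) ∧ Raises_nesting_score (pvRaiseWitness_nesting_score) ∧ nesting_score_alt (pvRaiseWitness_nesting_score) = pvRaiseWitnessOut_nesting_score)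

-- ===== LEMMAS AND PROOFS =====

lemma nesting_score_foldl_none (l : List Char) :
    l.foldl nesting_score_step none = none := by
  induction l with
  | nil => rfl
  | cons c cs ih => simpa [nesting_score_step] using ih

-- The bridge between B's recursive descent and A's stack machine: running A's
-- loop over `l` with stack `s ++ [a]` is, if parse closes (hits an unmatched
-- ']'), popping `a` (updated to the parsed score) into the last element of `s`
-- and continuing on the rest; otherwise the whole of `l` is consumed and the
-- level accumulator ends as the parsed score (deeper garbage `t` above it).
lemma nesting_score_parse_fold :
    ∀ (fuel : Nat) (l : List Char) (s : List Int) (a : Int), l.length + 1 ≤ fuel →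
    (match nesting_score_parse fuel l a with
     | (score, rest, true) =>
         rest.length ≤ l.length ∧
         l.foldl nesting_score_step (some (s ++ [a])) =
           rest.foldl nesting_score_step
             (match s.getLast? with
              | none => none
              | some b => some (s.dropLast ++ [b + nesting_score_f score]))
     | (score, rest, false) =>
         rest = [] ∧ ∃ t, l.foldl nesting_score_step (some (s ++ [a])) = some (s ++ score :: t)) := by
  intro fuel
  induction fuel with
  | zero => intro l s a h; omega
  | succ fuel ih =>
    intro l s a h
    cases l with
    | nil =>
      exact ⟨rfl, [], by simp⟩
    | cons c cs =>
      simp only [List.length_cons] at h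
      by_cases hc1 : c = '['
      · subst hc1
        have ih1 := ih cs (s ++ [a]) 0 (by omega)
        rcases hp : nesting_score_parse fuel cs 0 with ⟨inner, cs', closed⟩
        rw [hp] at ih1
        cases closed with
        | false =>
          obtain ⟨hrest, t, hfold⟩ := ih1
          simp only [nesting_score_parse, hp]
          refine ⟨hrest, inner :: t, ?_⟩
          simpa [nesting_score_step, List.append_assoc] using hfold
        | true =>
          obtain ⟨hlen, hfold⟩ := ih1
          simp only [List.getLast?_concat, List.dropLast_concat] at hfold
          have ih2 := ih cs' s (a + nesting_score_f inner) (by omega)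
          rcases hp2 : nesting_score_parse fuel cs' (a + nesting_score_f inner)
            with ⟨score2, rest2, closed2⟩
          rw [hp2] at ih2
          have hstep : ('[' :: cs).foldl nesting_score_step (some (s ++ [a])) =
              cs'.foldl nesting_score_step (some (s ++ [a + nesting_score_f inner])) := by
            simpa [nesting_score_step, List.append_assoc] using hfold
          simp only [nesting_score_parse, hp, hp2]
          cases closed2 with
          | false =>
            obtain ⟨hrest2, t, hfold2⟩ := ih2
            exact ⟨hrest2, t, by rw [hstep]; exact hfold2⟩
          | true =>
            obtain ⟨hlen2, hfold2⟩ := ih2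
            exact ⟨by simp; omega, by rw [hstep]; exact hfold2⟩
      · by_cases hc2 : c = ']'
        · subst hc2
          simp only [nesting_score_parse, reduceIte, List.length_cons]
          refine ⟨by omega, ?_⟩
          have hstep : nesting_score_step (some (s ++ [a])) ']' =
              (match s.getLast? with
               | none => none
               | some b => some (s.dropLast ++ [b + nesting_score_f a])) := by
            cases hs : s.getLast? with
            | none => simp [nesting_score_step, hs]
            | some b => simp [nesting_score_step, hs, nesting_score_f, mul_comm]
          simp only [List.foldl_cons, hstep]
        · have ih3 := ih cs s a (by omega)
          rcases hp : nesting_score_parse fuel cs a with ⟨score3, rest3, closed3⟩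
          rw [hp] at ih3
          simp only [nesting_score_parse, hp, hc1, hc2, if_false, List.length_cons]
          have hstep : nesting_score_step (some (s ++ [a])) c = some (s ++ [a]) := by
            simp [nesting_score_step, hc1, hc2]
          cases closed3 with
          | false => exact ⟨ih3.1, ih3.2.imp fun t ht => by simpa [hstep] using ht⟩
          | true => exact ⟨by omega, by simpa [hstep] using ih3.2⟩

-- Under the balanced-prefix condition A's fold never hits the error state.
lemma nesting_score_fold_ne_none :
    ∀ (l : List Char) (sta : List Int), sta ≠ [] →
    (∀ n ≤ l.length, (l.take n).count ']' + 1 ≤ (l.take n).count '[' + sta.length) →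
    ∃ sta', l.foldl nesting_score_step (some sta) = some sta' := by
  intro l
  induction l with
  | nil => exact fun sta _ _ => ⟨sta, rfl⟩
  | cons c cs ih =>
    intro sta hne h
    by_cases hc1 : c = '['
    · subst hc1
      refine (ih (sta ++ [0]) (by simp) ?_).imp (fun sta' hs => by
        simpa [nesting_score_step] using hs)
      intro n hn
      have := h (n + 1) (by simpa using hn)
      simp at this ⊢
      omega
    · by_cases hc2 : c = ']'
      · subst hc2
        have h1 := h 1 (by simp)
        simp at h1
        have hlen : 2 ≤ sta.length := by omega
        obtain ⟨ys, a, rfl⟩ := List.eq_nil_or_concat sta |>.resolve_left hne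
        have hys : ys ≠ [] := by
          intro hy; subst hy; simp at hlen
        obtain ⟨zs, b, rfl⟩ := List.eq_nil_or_concat ys |>.resolve_left hys
        refine (ih (zs ++ [b + (if a = 0 then 1 else a * 2)]) (by simp) ?_).imp
          (fun sta' hs => by
            simpa [nesting_score_step] using hs)
        intro n hn
        have := h (n + 1) (by simpa using hn)
        simp at this ⊢
        omega
      · refine (ih sta hne ?_).imp (fun sta' hs => by
          simpa [nesting_score_step, hc1, hc2] using hs)
        intro n hn
        have := h (n + 1) (by simpa using hn)
        simp [hc1, hc2] at this ⊢
        omega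

-- ===== VERDICT (by name: the statement is the Claim_ definition above) =====
theorem nesting_score_spec : Claim_equal_nesting_score := by
  intro s _ hpre
  unfold Spec_nesting_score nesting_score nesting_score_alt
  obtain ⟨sta', hsta⟩ := nesting_score_fold_ne_none s.toList [0] (by simp)
    (fun n hn => by have := hpre n hn; simp; omega)
  have hL := nesting_score_parse_fold (s.toList.length + 1) s.toList [] 0 (by omega)
  rcases hp : nesting_score_parse (s.toList.length + 1) s.toList 0 with ⟨score, rest, closed⟩
  rw [hp] at hL
  cases closed with
  | true =>
    obtain ⟨-, hfold⟩ := hL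
    simp only [List.getLast?_nil, List.nil_append, nesting_score_foldl_none] at hfold
    rw [hsta] at hfold
    cases hfold
  | false =>
    obtain ⟨-, t, hfold⟩ := hL
    simp only [List.nil_append] at hfold
    rw [hfold]
    rfl

theorem nesting_score_raises : Claim_raises_nesting_score := by
  unfold Claim_raises_nesting_score
  constructor
  · intro s _ ⟨n, hn, hlt⟩ hpre
    exact absurd (hpre n hn) (by omega)
  · refine ⟨by decide, ⟨1, by decide, by decide⟩, by decide⟩

-- witness self-check: B's port really returns the stated value where A raises
theorem pvRaiseWitness_nesting_score_ok :
    nesting_score_alt pvRaiseWitness_nesting_score = pvRaiseWitnessOut_nesting_score :=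
  nesting_score_raises.2.2.2
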